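-- pv_equiv track=rewrite | github.com/SahbiBenlamine/codility | SparseBinairyDecomposition.py | solution
-- ===== SOURCE A (Python) =====
-- def to_bin_int(list_bin_n):
--     str_n = ''.join(n for n in list_bin_n)
--     return int(str_n, 2)
--
-- def solution(N):
--     n = "{0:b}".format(N)
--
--     binary_n = list(str(n))
--     binary_r = ['0' for i in range(len(binary_n))]
--
--     for i in range(len(binary_n) -1):
--         if binary_n[i] == '1':
--             if binary_n[i + 1] == '1':
--                 binary_n[i + 1] = '0'
--                 binary_r[i + 1] = '1'
--
--     return to_bin_int(binary_n)
-- ===== SOURCE B (Python) =====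
-- def solution(N):
--     s = "{0:b}".format(N)
--     out = []
--     i = 0
--     n = len(s)
--     while i < n:
--         c = s[i]
--         if c == '1':
--             j = i
--             while j < n and s[j] == '1':
--                 j += 1
--             run_len = j - i
--             out.append(''.join('1' if k % 2 == 0 else '0' for k in range(run_len)))
--             i = j
--         else:
--             out.append(c)
--             i += 1
--     return int(''.join(out), 2)
-- ===== Notes on version B (the rewrite author's own statement) =====
-- stated objective: alternative
-- what changed: Instead of A's index loop that mutates the bit list in place (each step reading its own previous write) and A's dead parallel result list, B scans the binary string grouping maximal runs of consecutive '1's and emits for each run the alternating '10...' pattern of the same length, copying every other character (including '-') verbatim.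
import Mathlib
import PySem

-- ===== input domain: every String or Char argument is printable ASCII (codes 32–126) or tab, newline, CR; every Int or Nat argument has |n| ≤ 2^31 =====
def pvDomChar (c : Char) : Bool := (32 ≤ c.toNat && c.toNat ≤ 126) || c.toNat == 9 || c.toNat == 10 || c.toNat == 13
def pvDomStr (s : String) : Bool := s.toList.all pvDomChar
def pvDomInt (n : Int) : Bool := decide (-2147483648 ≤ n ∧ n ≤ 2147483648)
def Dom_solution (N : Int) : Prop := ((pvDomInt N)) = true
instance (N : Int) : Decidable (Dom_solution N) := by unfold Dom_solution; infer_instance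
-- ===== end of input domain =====

-- B rebuilds the binary string run-by-run (maximal '1'-runs become alternating '10…' patterns)
-- instead of A's in-place index loop with its dead parallel list; objective: alternative decomposition, same cost.

-- ===== PORT A =====
-- to_bin_int: ''.join over the chars, then int(s, 2); the join of singletons is exact via PySem.Chars.join.
-- int(s, 2) never raises on the strings A builds (always a valid signed binary literal), so .getD 0 is never taken.
def to_bin_int (list_bin_n : List Char) : Int :=
  (PySem.Int.ofCharsBase? (PySem.Chars.join [] (list_bin_n.map (fun n => [n]))) 2).getD 0

def solution (N : Int) : Int :=
  let n := PySem.Int.toBinChars N            -- "{0:b}".format(N); str(n) = n; list(...) = the char list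
  let binary_n := n
  let binary_r := (PySem.List.pyRange 0 (PySem.List.len binary_n) 1).map (fun _ => '0')
  let st := (PySem.List.pyRange 0 (PySem.List.len binary_n - 1) 1).foldl
    (fun (st : List Char × List Char) i =>
      if PySem.List.pyGetD st.1 i '?' = '1' then
        if PySem.List.pyGetD st.1 (i + 1) '?' = '1' then
          (PySem.List.pySetD st.1 (i + 1) '0', PySem.List.pySetD st.2 (i + 1) '1')
        else st
      else st)
    (binary_n, binary_r)
  to_bin_int st.1

-- ===== PORT B =====
-- the run-pattern comprehension ''.join('1' if k % 2 == 0 else '0' for k in range(L))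
def pvAltPat (L : Nat) : List Char :=
  (List.range L).map (fun k => if k % 2 = 0 then '1' else '0')

-- the outer while-loop of Source B; the inner run-scanning while-loop is takeWhile/dropWhile
def pvRebuild : List Char → List Char
  | [] => []
  | c :: rest =>
    if c = '1' then
      pvAltPat (1 + (rest.takeWhile (· == '1')).length) ++ pvRebuild (rest.dropWhile (· == '1'))
    else c :: pvRebuild rest
  termination_by cs => cs.length
  decreasing_by
  · simpa using Nat.lt_succ_of_le (List.length_dropWhile_le _ _)
  · simp

def solution_alt (N : Int) : Int :=
  (PySem.Int.ofCharsBase? (pvRebuild (PySem.Int.toBinChars N)) 2).getD 0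

-- ===== PRECONDITION & SPEC =====
def Spec_solution (N : Int) (out : Int) : Prop := out = solution_alt N
instance (N : Int) (out : Int) : Decidable (Spec_solution N out) := by unfold Spec_solution; infer_instance

-- ===== CLAIM (what is proved, stated in full; the proofs are below) =====
def Claim_equal_solution : Prop := ∀ (N : Int), Dom_solution N → Spec_solution N (solution N)

-- ===== LEMMAS AND PROOFS =====

-- A's loop, single-state form (only the binary_n component; binary_r is dead)
def pvF (cur : List Char) (i : Int) : List Char :=
  if PySem.List.pyGetD cur i '?' = '1' then
    if PySem.List.pyGetD cur (i + 1) '?' = '1' then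
      PySem.List.pySetD cur (i + 1) '0'
    else cur
  else cur

-- the recursion A's loop implements
def pvStepA : List Char → List Char
  | [] => []
  | [c] => [c]
  | a :: b :: t =>
    if a = '1' ∧ b = '1' then a :: pvStepA ('0' :: t) else a :: pvStepA (b :: t)
  termination_by cs => cs.length

lemma pair_fst (idxs : List Int) (nl rl : List Char) :
    (idxs.foldl
      (fun (st : List Char × List Char) i =>
        if PySem.List.pyGetD st.1 i '?' = '1' then
          if PySem.List.pyGetD st.1 (i + 1) '?' = '1' then
            (PySem.List.pySetD st.1 (i + 1) '0', PySem.List.pySetD st.2 (i + 1) '1')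
          else st
        else st)
      (nl, rl)).1 = idxs.foldl pvF nl := by
  induction idxs generalizing nl rl with
  | nil => rfl
  | cons i idxs ih =>
    simp only [List.foldl_cons, pvF]
    split_ifs <;> exact ih _ _

lemma getD_append_self (pre : List Char) (x : Char) (l : List Char) (d : Char) :
    (pre ++ x :: l).getD pre.length d = x := by
  induction pre with
  | nil => rfl
  | cons p ps _ => simp

lemma set_append_succ (pre : List Char) (a v : Char) (l : List Char) :
    (pre ++ a :: l).set (pre.length + 1) v = pre ++ a :: l.set 0 v := by
  induction pre with
  | nil => rfl
  | cons p ps ih =>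
    simp only [List.cons_append, List.length_cons]
    show p :: (ps ++ a :: l).set (ps.length + 1) v = p :: ps ++ a :: l.set 0 v
    rw [ih]; rfl

lemma loop_shift (m : Nat) (cs pre : List Char) (hm : cs.length = m) :
    (PySem.List.pyRange (pre.length : Int) ((pre.length : Int) + cs.length - 1) 1).foldl
      pvF (pre ++ cs) = pre ++ pvStepA cs := by
  induction m using Nat.strong_induction_on generalizing cs pre with
  | _ m ih =>
    match cs with
    | [] =>
      rw [PySem.List.pyRange_one_eq_nil (by simp)]
      rw [List.foldl_nil, pvStepA]
    | [c] =>
      rw [PySem.List.pyRange_one_eq_nil (by simp)]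
      rw [List.foldl_nil, pvStepA]
    | a :: b :: t =>
      subst hm
      have hlen : ((pre.length : Int) + (a :: b :: t).length - 1)
          = (pre.length : Int) + (t.length + 1) := by simp; ring
      rw [hlen, PySem.List.pyRange_one_cons (by omega), List.foldl_cons]
      have hcast1 : (pre.length : Int) + 1 = ((pre.length + 1 : Nat) : Int) := by push_cast; ring
      have hga : PySem.List.pyGetD (pre ++ a :: b :: t) (pre.length : Int) '?' = a := by
        rw [PySem.List.pyGetD_natCast]; exact getD_append_self pre a _ '?'
      have hgb : PySem.List.pyGetD (pre ++ a :: b :: t) ((pre.length : Int) + 1) '?' = b := by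
        rw [hcast1, PySem.List.pyGetD_natCast]
        have : (pre ++ a :: b :: t).getD (pre.length + 1) '?'
            = ((pre ++ [a]) ++ b :: t).getD (pre ++ [a]).length '?' := by simp
        rw [this, getD_append_self]
      have hset : PySem.List.pySetD (pre ++ a :: b :: t) ((pre.length : Int) + 1) '0'
          = pre ++ a :: '0' :: t := by
        rw [hcast1, PySem.List.pySetD_natCast, set_append_succ]; rfl
      have hrange : ∀ c' : Char,
          (PySem.List.pyRange ((pre.length : Int) + 1) ((pre.length : Int) + (t.length + 1)) 1).foldl
            pvF (pre ++ a :: c' :: t) = pre ++ a :: pvStepA (c' :: t) := by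
        intro c'
        have h := ih (t.length + 1) (by omega) (c' :: t) (pre ++ [a]) (by simp)
        have e1 : (((pre ++ [a]).length : Nat) : Int) = (pre.length : Int) + 1 := by
          simp
        have e2 : (pre.length : Int) + 1 + (((c' :: t).length : Nat) : Int) - 1
            = (pre.length : Int) + ((t.length : Int) + 1) := by
          simp only [List.length_cons]; push_cast; omega
        rw [e1, e2] at h
        simp only [List.append_assoc, List.singleton_append] at h
        exact h
      have hstep : pvF (pre ++ a :: b :: t) (pre.length : Int)
          = pre ++ a :: (if a = '1' ∧ b = '1' then '0' else b) :: t := by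
        simp only [pvF]
        rw [hga, hgb]
        by_cases h1 : a = '1'
        · by_cases h2 : b = '1'
          · rw [if_pos h1, if_pos h2, if_pos ⟨h1, h2⟩]; exact hset
          · rw [if_pos h1, if_neg h2, if_neg (fun hab => h2 hab.2)]
        · rw [if_neg h1, if_neg (fun hab => h1 hab.1)]
      by_cases hab : a = '1' ∧ b = '1'
      · rw [hstep, if_pos hab, hrange '0']
        have : pvStepA (a :: b :: t) = a :: pvStepA ('0' :: t) := by
          rw [pvStepA, if_pos hab]
        rw [this]
      · rw [hstep, if_neg hab, hrange b]
        have : pvStepA (a :: b :: t) = a :: pvStepA (b :: t) := by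
          rw [pvStepA, if_neg hab]
        rw [this]

lemma altPat_two (L : Nat) : pvAltPat (L + 2) = '1' :: '0' :: pvAltPat L := by
  unfold pvAltPat
  rw [show L + 2 = (L + 1) + 1 from rfl, List.range_succ_eq_map, List.range_succ_eq_map]
  simp only [List.map_cons, List.map_map, List.cons.injEq]
  refine ⟨by norm_num, by norm_num, ?_⟩
  apply List.map_congr_left
  intro k _
  have hk : (k + 1 + 1) % 2 = k % 2 := by omega
  simp [Function.comp, hk]

lemma rebuild_run (t : List Char) :
    pvAltPat ((t.takeWhile (· == '1')).length) ++ pvRebuild (t.dropWhile (· == '1'))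
      = pvRebuild t := by
  cases t with
  | nil => simp [pvAltPat, pvRebuild]
  | cons c t' =>
    by_cases hc : c = '1'
    · have hb : (c == '1') = true := by simp [hc]
      rw [pvRebuild, if_pos hc]
      simp [hb, Nat.add_comm]
    · have hb : (c == '1') = false := by simp [hc]
      rw [List.takeWhile_cons, List.dropWhile_cons, hb]
      simp [pvAltPat]

lemma rebuild_nil : pvRebuild [] = [] := by rw [pvRebuild]

lemma rebuild_zero (t : List Char) : pvRebuild ('0' :: t) = '0' :: pvRebuild t := by
  rw [pvRebuild]; simp

lemma stepA_eq_rebuild (cs : List Char) : pvStepA cs = pvRebuild cs := by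
  induction cs using pvStepA.induct with
  | case1 => rw [pvStepA, rebuild_nil]
  | case2 c =>
    by_cases hc : c = '1'
    · subst hc
      rw [pvStepA, pvRebuild, if_pos rfl]
      simp [List.takeWhile, List.dropWhile, pvAltPat, rebuild_nil]
    · rw [pvStepA, pvRebuild, if_neg hc, rebuild_nil]
  | case3 a b t h ih =>
    obtain ⟨ha, hb⟩ := h
    subst ha; subst hb
    have h2 : pvRebuild ('1' :: '1' :: t)
        = '1' :: '0' :: (pvAltPat ((t.takeWhile (· == '1')).length)
            ++ pvRebuild (t.dropWhile (· == '1'))) := by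
      rw [pvRebuild, if_pos rfl]
      simp only [List.takeWhile_cons, List.dropWhile_cons, beq_self_eq_true, if_true,
        List.length_cons]
      rw [show 1 + ((List.takeWhile (fun x => x == '1') t).length + 1)
          = (List.takeWhile (fun x => x == '1') t).length + 2 by omega, altPat_two]
      simp
    rw [pvStepA, if_pos ⟨rfl, rfl⟩, h2, rebuild_run, ih, rebuild_zero]
  | case4 a b t h ih =>
    rw [pvStepA, if_neg h]
    by_cases ha : a = '1'
    · have hb : ¬ b = '1' := fun hb => h ⟨ha, hb⟩
      subst ha
      have hbb : (b == '1') = false := by simp [hb]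
      rw [pvRebuild, if_pos rfl]
      simp only [List.takeWhile_cons, List.dropWhile_cons, hbb]
      rw [ih]
      simp [pvAltPat]
    · rw [pvRebuild, if_neg ha, ih]

-- ===== VERDICT (by name: the statement is the Claim_ definition above) =====
theorem solution_spec : Claim_equal_solution := by
  intro N _
  unfold Spec_solution solution solution_alt to_bin_int
  simp only []
  rw [pair_fst]
  have := loop_shift (PySem.Int.toBinChars N).length (PySem.Int.toBinChars N) [] rfl
  simp only [List.nil_append, List.length_nil, Nat.cast_zero, zero_add] at this
  rw [show PySem.List.len (PySem.Int.toBinChars N) - 1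
      = ((PySem.Int.toBinChars N).length : Int) - 1 by simp,
    show ((PySem.Int.toBinChars N).length : Int) - 1
      = (0 : Int) + ((PySem.Int.toBinChars N).length : Int) - 1 by ring] at *
  rw [this, stepA_eq_rebuild]
  rw [PySem.Chars.join_nil_singletons]
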